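-- pv_equiv track=rewrite | github.com/CodingVillainKor/raenim | raenim/text.py | _build_spans
-- ===== SOURCE A (Python) =====
-- def _build_spans(s: str) -> list[tuple[int, int]]:
--     spans: list[tuple[int, int]] = []
--     in_word = False
--     nonws_idx = 0
--     start_nonws = 0
--
--     for ch in s:
--         if ch.isspace():
--             if in_word:
--                 spans.append((start_nonws, nonws_idx))
--                 in_word = False
--         else:
--             if not in_word:
--                 start_nonws = nonws_idx
--                 in_word = True
--             nonws_idx += 1
--
--     if in_word:
--         spans.append((start_nonws, nonws_idx))
--
--     return spans
-- ===== SOURCE B (Python) =====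
-- def _build_spans(s: str) -> list[tuple[int, int]]:
--     spans: list[tuple[int, int]] = []
--     acc = 0
--     for w in s.split():
--         spans.append((acc, acc + len(w)))
--         acc += len(w)
--     return spans
-- ===== Notes on version B (the rewrite author's own statement) =====
-- stated objective: simpler
-- what changed: Replaces the per-character in_word/nonws_idx state machine with tokenize-then-accumulate: s.split() yields the words, and each span is (acc, acc+len(word)) with acc the running sum of word lengths. (same O(n), but tokenization runs in C via str.split instead of a per-character Python loop)
import Mathlib
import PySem

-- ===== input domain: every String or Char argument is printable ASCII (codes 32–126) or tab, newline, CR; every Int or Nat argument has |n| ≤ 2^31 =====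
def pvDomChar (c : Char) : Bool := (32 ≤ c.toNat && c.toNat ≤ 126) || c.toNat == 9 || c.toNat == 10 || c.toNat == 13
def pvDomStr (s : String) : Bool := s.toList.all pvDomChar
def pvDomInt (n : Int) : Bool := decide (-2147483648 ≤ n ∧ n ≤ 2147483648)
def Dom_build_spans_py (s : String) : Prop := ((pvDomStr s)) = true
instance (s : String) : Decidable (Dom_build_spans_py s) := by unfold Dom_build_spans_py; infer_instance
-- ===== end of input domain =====

-- B replaces A's per-character in_word state machine with split()-then-accumulate
-- word lengths (objective: simpler); return values proved equal on all strings.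

-- ===== PORT A =====
-- A's for-loop over the characters, carrying (spans, in_word, nonws_idx, start_nonws);
-- the trailing 'if in_word' is the base case of the recursion.
def buildSpansLoop : List Char → List (Int × Int) → Bool → Int → Int → List (Int × Int)
  | [], spans, in_word, nonws_idx, start_nonws =>
      if in_word then spans ++ [(start_nonws, nonws_idx)] else spans
  | c :: rest, spans, in_word, nonws_idx, start_nonws =>
      if PySem.Chars.isspace c then
        if in_word then
          buildSpansLoop rest (spans ++ [(start_nonws, nonws_idx)]) false nonws_idx start_nonws
        else
          buildSpansLoop rest spans in_word nonws_idx start_nonws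
      else
        if in_word then
          buildSpansLoop rest spans in_word (nonws_idx + 1) start_nonws
        else
          buildSpansLoop rest spans true (nonws_idx + 1) nonws_idx

def build_spans_py (s : String) : List (Int × Int) :=
  buildSpansLoop s.toList [] false 0 0

-- ===== PORT B =====
-- B: words = s.split(); fold appending (acc, acc + len(w)) and advancing acc.
def build_spans_py_alt (s : String) : List (Int × Int) :=
  let words := PySem.Str.split₀ s
  (words.foldl
    (fun (st : List (Int × Int) × Int) w =>
      (st.1 ++ [(st.2, st.2 + PySem.Str.len w)], st.2 + PySem.Str.len w))
    ([], 0)).1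

-- ===== PRECONDITION & SPEC =====
def Spec_build_spans_py (s : String) (out : List (Int × Int)) : Prop := out = build_spans_py_alt s
instance (s : String) (out : List (Int × Int)) : Decidable (Spec_build_spans_py s out) := by unfold Spec_build_spans_py; infer_instance

-- ===== CLAIM (what is proved, stated in full; the proofs are below) =====
def Claim_equal_build_spans_py : Prop := ∀ (s : String), Dom_build_spans_py s → Spec_build_spans_py s (build_spans_py s)

-- ===== LEMMAS AND PROOFS =====

-- the spans determined by a word list and a running non-whitespace offset
def spansFrom : List (List Char) → Int → List (Int × Int)
  | [], _ => []
  | w :: ws, acc => (acc, acc + w.length) :: spansFrom ws (acc + (w.length : Int))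

-- split₀.go with the accumulator stripped (cur is stored reversed, as in go)
def wordsC : List Char → List Char → List (List Char)
  | [], cur => if cur.isEmpty then [] else [cur.reverse]
  | c :: rest, cur =>
      if PySem.Chars.isspace c then
        if cur.isEmpty then wordsC rest [] else cur.reverse :: wordsC rest []
      else wordsC rest (c :: cur)

lemma go_eq_wordsC : ∀ (cs cur : List Char) (acc : List (List Char)),
    PySem.Chars.split₀.go cs cur acc = acc.reverse ++ wordsC cs cur := by
  intro cs
  induction cs with
  | nil =>
      intro cur acc
      by_cases h : cur.isEmpty <;> simp [PySem.Chars.split₀.go, wordsC, h]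
  | cons c rest ih =>
      intro cur acc
      by_cases hs : PySem.Chars.isspace c <;> by_cases hc : cur.isEmpty <;>
        simp [PySem.Chars.split₀.go, wordsC, hs, hc, ih]

lemma split₀_eq_wordsC (cs : List Char) : PySem.Chars.split₀ cs = wordsC cs [] := by
  simp [PySem.Chars.split₀, go_eq_wordsC]

lemma loopA_eq : ∀ (cs : List Char) (spans : List (Int × Int)) (inw : Bool)
    (idx start : Int) (cur : List Char),
    (inw = true → cur ≠ [] ∧ idx = start + cur.length) →
    (inw = false → cur = []) →
    buildSpansLoop cs spans inw idx start =
      spans ++ spansFrom (wordsC cs cur) (if inw then start else idx) := by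
  intro cs
  induction cs with
  | nil =>
      intro spans inw idx start cur h1 h0
      cases inw with
      | false =>
          simp [buildSpansLoop, h0 rfl, wordsC, spansFrom]
      | true =>
          obtain ⟨hne, hidx⟩ := h1 rfl
          simp [buildSpansLoop, wordsC, List.isEmpty_iff, hne, spansFrom, hidx]
  | cons c rest ih =>
      intro spans inw idx start cur h1 h0
      cases inw with
      | false =>
          have hc := h0 rfl; subst hc
          by_cases hs : PySem.Chars.isspace c
          · simpa [buildSpansLoop, hs, wordsC] using
              ih spans false idx start [] (by simp) (fun _ => rfl)
          · simpa [buildSpansLoop, hs, wordsC] using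
              ih spans true (idx + 1) idx [c] (fun _ => by simp) (by simp)
      | true =>
          obtain ⟨hne, hidx⟩ := h1 rfl
          by_cases hs : PySem.Chars.isspace c
          · rw [show buildSpansLoop (c :: rest) spans true idx start =
                buildSpansLoop rest (spans ++ [(start, idx)]) false idx start by
                  simp [buildSpansLoop, hs]]
            rw [ih (spans ++ [(start, idx)]) false idx start [] (by simp) (fun _ => rfl)]
            simp [wordsC, hs, List.isEmpty_iff, hne, spansFrom, hidx]
          · rw [show buildSpansLoop (c :: rest) spans true idx start =
                buildSpansLoop rest spans true (idx + 1) start by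
                  simp [buildSpansLoop, hs]]
            rw [ih spans true (idx + 1) start (c :: cur)
                (fun _ => ⟨by simp, by simp only [List.length_cons]; push_cast; omega⟩) (by simp)]
            simp [wordsC, hs]

lemma foldB_eq : ∀ (ws : List String) (out : List (Int × Int)) (acc : Int),
    (ws.foldl
      (fun (st : List (Int × Int) × Int) w =>
        (st.1 ++ [(st.2, st.2 + PySem.Str.len w)], st.2 + PySem.Str.len w))
      (out, acc)).1 = out ++ spansFrom (ws.map String.toList) acc := by
  intro ws
  induction ws with
  | nil => simp [spansFrom]
  | cons w rest ih =>
      intro out acc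
      simp only [List.foldl_cons]
      rw [ih]
      simp [spansFrom, PySem.Str.len]

-- ===== VERDICT (by name: the statement is the Claim_ definition above) =====
theorem build_spans_py_spec : Claim_equal_build_spans_py := by
  intro s _
  unfold Spec_build_spans_py build_spans_py build_spans_py_alt
  rw [loopA_eq s.toList [] false 0 0 [] (by simp) (fun _ => rfl)]
  rw [foldB_eq]
  simp [PySem.Str.split₀_map_toList, split₀_eq_wordsC]
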